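-- pv_equiv track=rewrite | github.com/thealper2/codewars-solutions | 7-kyu/the_skiponacci_sequence.py | skiponacci
-- ===== SOURCE A (Python) =====
-- def skiponacci(n):
--     if n == 0:
--         return ""
--
--     result = []
--     a, b = 0, 1
--
--     for i in range(1, n + 1):
--         if i % 2 == 1:
--             result.append(str(b))
--         else:
--             result.append("skip")
--         a, b = b, a + b
--
--     return " ".join(result)
-- ===== SOURCE B (Python) =====
-- def skiponacci(n):
--     # Phase 1: generate the (n+1)//2 Fibonacci values that actually appear
--     # (1, 2, 5, 13, ... = every other Fibonacci), via v' = 3*v - prev.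
--     k = (n + 1) // 2
--     nums = []
--     a, b = 1, 1
--     for _ in range(k):
--         nums.append(b)
--         a, b = b, 3 * b - a
--     # Phase 2: interleave each value with "skip", then trim to n terms.
--     out = []
--     for v in nums:
--         out.append(str(v))
--         out.append("skip")
--     return " ".join(out[:n])
-- ===== Notes on version B (the rewrite author's own statement) =====
-- stated objective: alternative
-- what changed: B splits the work into two phases: it first generates only the Fibonacci values that actually appear (half as many terms as output slots) via the skip-recurrence v' = 3v - prev with no per-index parity test, then interleaves them with "skip" and trims to n terms; A runs one parity-branching loop over all n indices carrying the full Fibonacci pair.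
import Mathlib
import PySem

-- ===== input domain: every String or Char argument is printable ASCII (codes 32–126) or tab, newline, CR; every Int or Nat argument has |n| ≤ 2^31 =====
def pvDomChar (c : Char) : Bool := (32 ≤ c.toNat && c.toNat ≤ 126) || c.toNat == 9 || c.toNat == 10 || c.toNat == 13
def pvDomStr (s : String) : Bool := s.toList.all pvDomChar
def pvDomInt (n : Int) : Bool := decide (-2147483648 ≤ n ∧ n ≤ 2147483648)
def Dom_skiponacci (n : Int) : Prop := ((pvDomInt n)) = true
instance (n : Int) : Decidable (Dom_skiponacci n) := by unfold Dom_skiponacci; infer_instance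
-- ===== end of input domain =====

-- B splits the work in two phases (generate the (n+1)//2 Fibonacci values via v' = 3v - prev,
-- then interleave with "skip" and trim to n) instead of A's single parity-branching loop: alternative decomposition, same cost.

-- ===== PORT A =====
def skiponacci (n : Int) : String :=
  if n = 0 then ""
  else
    let st := (PySem.List.pyRange 1 (n + 1) 1).foldl
      (fun (s : List String × Int × Int) (i : Int) =>
        if PySem.Int.mod i 2 = 1 then (s.1 ++ [PySem.Int.toStr s.2.2], s.2.2, s.2.1 + s.2.2)
        else (s.1 ++ ["skip"], s.2.2, s.2.1 + s.2.2))
      ([], 0, 1)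
    PySem.Str.join " " st.1

-- ===== PORT B =====
def skiponacci_alt (n : Int) : String :=
  let k := PySem.Int.floordiv (n + 1) 2
  let st := (PySem.List.pyRange 0 k 1).foldl
    (fun (s : List Int × Int × Int) (_ : Int) =>
      (s.1 ++ [s.2.2], s.2.2, 3 * s.2.2 - s.2.1))
    ([], 1, 1)
  let out := st.1.foldl (fun (acc : List String) (v : Int) =>
    acc ++ [PySem.Int.toStr v, "skip"]) []
  PySem.Str.join " " (PySem.List.slice out none (some n))

-- ===== PRECONDITION & SPEC =====
def Spec_skiponacci (n : Int) (out : String) : Prop := out = skiponacci_alt n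
instance (n : Int) (out : String) : Decidable (Spec_skiponacci n out) := by unfold Spec_skiponacci; infer_instance

-- ===== CLAIM (what is proved, stated in full; the proofs are below) =====
def Claim_equal_skiponacci : Prop := ∀ (n : Int), Dom_skiponacci n → Spec_skiponacci n (skiponacci n)

-- ===== LEMMAS AND PROOFS =====

-- state of A's loop after m iterations (i = 1..m); parity of i = m+1 is decided by m
def stA : Nat → List String × Int × Int
  | 0 => ([], 0, 1)
  | m + 1 =>
    let s := stA m
    (s.1 ++ [if m % 2 = 0 then PySem.Int.toStr s.2.2 else "skip"], s.2.2, s.2.1 + s.2.2)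

-- state of B's number-generating loop after c iterations
def stN : Nat → List Int × Int × Int
  | 0 => ([], 1, 1)
  | c + 1 =>
    let s := stN c
    (s.1 ++ [s.2.2], s.2.2, 3 * s.2.2 - s.2.1)

def intlF (l : List Int) : List String := l.flatMap (fun v => [PySem.Int.toStr v, "skip"])

lemma foldA_eq (m : Nat) :
    (List.range m).foldl
      (fun (s : List String × Int × Int) (j : Nat) =>
        if PySem.Int.mod (1 + (j : Int)) 2 = 1 then
          (s.1 ++ [PySem.Int.toStr s.2.2], s.2.2, s.2.1 + s.2.2)
        else (s.1 ++ ["skip"], s.2.2, s.2.1 + s.2.2))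
      ([], 0, 1) = stA m := by
  induction m with
  | zero => rfl
  | succ m ih =>
    rw [List.range_succ, List.foldl_append, ih]
    simp only [List.foldl_cons, List.foldl_nil]
    have h1 : (1 + (m : Int)) = ((1 + m : Nat) : Int) := by push_cast; ring
    have h2 : PySem.Int.mod (1 + (m : Int)) 2 = (((1 + m) % 2 : Nat) : Int) := by
      rw [h1]; exact_mod_cast PySem.Int.mod_natCast (1 + m) 2
    by_cases hp : m % 2 = 0
    · have h3 : (1 + m) % 2 = 1 := by omega
      rw [h2, h3]
      simp [stA, hp]
    · have h3 : (1 + m) % 2 = 0 := by omega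
      rw [h2, h3]
      simp [stA, hp]

lemma foldN_eq (c : Nat) :
    (List.range c).foldl
      (fun (s : List Int × Int × Int) (_ : Nat) =>
        (s.1 ++ [s.2.2], s.2.2, 3 * s.2.2 - s.2.1))
      ([], 1, 1) = stN c := by
  induction c with
  | zero => rfl
  | succ c ih => rw [List.range_succ, List.foldl_append, ih]; rfl

-- the combined invariant linking A's state after 2k steps with B's after k
lemma main_inv (k : Nat) :
    (stA (2 * k)).1 = intlF (stN k).1 ∧
    (stA (2 * k)).2.2 = (stN k).2.2 ∧
    (stA (2 * k)).2.2 - (stA (2 * k)).2.1 = (stN k).2.1 ∧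
    ((stN k).1).length = k := by
  induction k with
  | zero => simp [stA, stN, intlF]
  | succ k ih =>
    obtain ⟨h1, h2, h3, h4⟩ := ih
    have hpar0 : (2 * k) % 2 = 0 := by omega
    have hpar1 : (2 * k + 1) % 2 = 1 := by omega
    have eA1 : stA (2 * k + 1) =
        ((stA (2 * k)).1 ++ [PySem.Int.toStr (stA (2 * k)).2.2],
          (stA (2 * k)).2.2, (stA (2 * k)).2.1 + (stA (2 * k)).2.2) := by
      simp [stA, hpar0]
    have eA2 : stA (2 * (k + 1)) =
        ((stA (2 * k + 1)).1 ++ ["skip"],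
          (stA (2 * k + 1)).2.2, (stA (2 * k + 1)).2.1 + (stA (2 * k + 1)).2.2) := by
      have e : 2 * (k + 1) = (2 * k + 1) + 1 := by ring
      rw [e]; simp [stA, hpar1]
    have eN : stN (k + 1) =
        ((stN k).1 ++ [(stN k).2.2], (stN k).2.2, 3 * (stN k).2.2 - (stN k).2.1) := rfl
    refine ⟨?_, ?_, ?_, ?_⟩
    · rw [eA2, eA1, eN]
      simp only [intlF, List.flatMap_append]
      simp [intlF, h1, h2]
    · rw [eA2, eA1, eN]; dsimp only; omega
    · rw [eA2, eA1, eN]; dsimp only; omega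
    · rw [eN]; simp [h4]

lemma length_intlF (l : List Int) : (intlF l).length = 2 * l.length := by
  induction l with
  | nil => rfl
  | cons x xs ih => simp [intlF] at ih ⊢; omega

-- A's list after m steps equals B's interleaved list trimmed to m
lemma lists_eq (m : Nat) : (stA m).1 = (intlF (stN ((m + 1) / 2)).1).take m := by
  rcases Nat.even_or_odd m with ⟨k, hk⟩ | ⟨k, hk⟩
  · subst hk
    have hm : (k + k + 1) / 2 = k := by omega
    have e2 : k + k = 2 * k := by omega
    obtain ⟨h1, _, _, h4⟩ := main_inv k
    have hl : (intlF (stN k).1).length = 2 * k := by rw [length_intlF, h4]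
    rw [hm, e2, h1, ← hl, List.take_length]
  · subst hk
    have hm : (2 * k + 1 + 1) / 2 = k + 1 := by omega
    obtain ⟨h1, h2, h3, h4⟩ := main_inv k
    have hpar0 : (2 * k) % 2 = 0 := by omega
    have hsplit : intlF (stN (k + 1)).1
        = (intlF (stN k).1 ++ [PySem.Int.toStr (stN k).2.2]) ++ ["skip"] := by
      simp only [stN, intlF, List.flatMap_append]
      simp
    have hlen : (intlF (stN k).1 ++ [PySem.Int.toStr (stN k).2.2]).length = 2 * k + 1 := by
      simp [length_intlF, h4]
    rw [hm, hsplit, List.take_left' hlen]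
    show (stA (2 * k + 1)).1 = _
    simp only [stA, hpar0]
    simp [h1, h2]

-- ===== VERDICT (by name: the statement is the Claim_ definition above) =====
theorem skiponacci_spec : Claim_equal_skiponacci := by
  intro n _
  show skiponacci n = skiponacci_alt n
  simp only [skiponacci, skiponacci_alt]
  by_cases hneg : n ≤ 0
  · have hk : PySem.Int.floordiv (n + 1) 2 < 1 :=
      (PySem.Int.floordiv_lt_iff_lt_mul (by omega)).mpr (by omega)
    have hA : PySem.List.pyRange 1 (n + 1) 1 = ([] : List Int) :=
      PySem.List.pyRange_one_eq_nil (by omega)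
    have hB : PySem.List.pyRange 0 (PySem.Int.floordiv (n + 1) 2) 1 = ([] : List Int) :=
      PySem.List.pyRange_one_eq_nil (by omega)
    rw [hA, hB]
    simp [PySem.List.slice]
    intro _
    rfl
  · have hn0 : n ≠ 0 := by omega
    rw [if_neg hn0]
    obtain ⟨m, rfl⟩ : ∃ m : Nat, n = (m : Int) := ⟨n.toNat, by omega⟩
    have hm1 : (m : Int) + 1 - 1 = ((m : Nat) : Int) := by ring
    have hk : PySem.Int.floordiv ((m : Int) + 1) 2 = (((m + 1) / 2 : Nat) : Int) := by
      have : ((m : Int) + 1) = ((m + 1 : Nat) : Int) := by push_cast; ring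
      rw [this]; exact_mod_cast PySem.Int.floordiv_natCast (m + 1) 2
    rw [PySem.List.pyRange_one 1 ((m : Int) + 1), hk,
        PySem.List.pyRange_one 0 (((m + 1) / 2 : Nat) : Int)]
    simp only [List.foldl_map, hm1, Int.toNat_natCast, sub_zero]
    rw [foldA_eq]
    have hfn : (List.range ((m + 1) / 2)).foldl
        (fun (s : List Int × Int × Int) (_ : Nat) =>
          (s.1 ++ [s.2.2], s.2.2, 3 * s.2.2 - s.2.1)) ([], 1, 1) = stN ((m + 1) / 2) :=
      foldN_eq ((m + 1) / 2)
    rw [hfn]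
    rw [PySem.List.foldl_append_eq_flatMap (fun v => [PySem.Int.toStr v, "skip"])]
    rw [PySem.List.slice_to_natCast]
    congr 1
    simpa [intlF] using lists_eq m
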